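-- pv_equiv track=rewrite | github.com/BharatSuthar21/WebPage-Similarity | webPageSimilarity.py | simHash
-- ===== SOURCE A (Python) =====
-- def simHash(doc, p=53, m=2**64):
--     """
--     return the simhash of each ngram or word of the document
--     """
--     hash_dic = {}
--
--     for i in doc:
--         score = 0
--         count = 0
--         for j in i:
--             score += ord(j)*(p**count)
--             count+=1
--
--         hash_dic[i] = decimal_to_binary(score%m)
--     return hash_dic
--
-- def decimal_to_binary(num):
--     binary_rep = str(bin(num))[2:]
--     return "0"*(64 - len(binary_rep))+binary_rep
-- ===== SOURCE B (Python) =====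
-- def simHash(doc, p=53, m=2**64):
--     """
--     return the simhash of each ngram or word of the document
--     """
--     hash_dic = {}
--     for w in doc:
--         if w not in hash_dic:
--             hash_dic[w] = decimal_to_binary(_hash(w, p) % m)
--     return hash_dic
--
-- def _hash(s, p):
--     # divide-and-conquer polynomial hash: hash(s) = hash(L) + p**len(L) * hash(R)
--     n = len(s)
--     if n == 0:
--         return 0
--     if n == 1:
--         return ord(s)
--     half = n // 2
--     return _hash(s[:half], p) + p**half * _hash(s[half:], p)
--
-- def decimal_to_binary(num):
--     binary_rep = str(bin(num))[2:]
--     return "0"*(64 - len(binary_rep))+binary_rep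
-- ===== Notes on version B (the rewrite author's own statement) =====
-- stated objective: alternative
-- what changed: Replaces the linear power/count accumulation with a recursive divide-and-conquer polynomial hash (hash(s)=hash(L)+p**len(L)*hash(R)) and makes the dict loop skip keys already present instead of overwriting them with the identical value.
import Mathlib
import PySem

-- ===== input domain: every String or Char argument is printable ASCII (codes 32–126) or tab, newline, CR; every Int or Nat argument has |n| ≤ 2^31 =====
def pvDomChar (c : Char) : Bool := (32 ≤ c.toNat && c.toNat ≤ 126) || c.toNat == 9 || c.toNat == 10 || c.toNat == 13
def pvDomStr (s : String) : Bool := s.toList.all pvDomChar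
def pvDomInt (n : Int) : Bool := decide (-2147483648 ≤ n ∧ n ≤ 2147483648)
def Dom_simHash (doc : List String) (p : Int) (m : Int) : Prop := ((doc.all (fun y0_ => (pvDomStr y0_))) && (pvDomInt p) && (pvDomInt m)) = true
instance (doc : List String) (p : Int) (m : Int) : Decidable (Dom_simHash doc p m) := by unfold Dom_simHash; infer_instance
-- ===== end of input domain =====

-- B replaces the power/count accumulation with a recursive divide-and-conquer polynomial
-- hash and skips dict keys already present instead of overwriting with the same value.

-- shared helper (decimal_to_binary is identical in A and B)
def decToBin (num : Int) : String :=
  let binary_rep := PySem.Str.slice (PySem.Int.pyBin num) (some 2) none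
  String.ofList (PySem.List.pyRepeat ['0'] (64 - PySem.Str.len binary_rep)) ++ binary_rep

-- ===== PORT A =====
def simHash (doc : List String) (p : Int) (m : Int) : List (String × String) :=
  (doc.foldl (fun (d : PySem.Dict String String) i =>
      let st := i.toList.foldl
        (fun (st : Int × Nat) j => (st.1 + (j.toNat : Int) * p ^ st.2, st.2 + 1)) ((0 : Int), (0 : Nat))
      d.insert i (decToBin (PySem.Int.mod st.1 m)))
    PySem.Dict.empty).items

-- ===== PORT B =====
-- _hash over the string's char list (Str functions are wrappers over List Char);
-- half = len(s)//2 is Nat division (exact: len(s) ≥ 0), s[:half]/s[half:] are take/drop (0 ≤ half ≤ len).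
def hashDC (p : Int) (s : List Char) : Int :=
  match s with
  | [] => 0
  | [c] => (c.toNat : Int)
  | a :: b :: t =>
      let half := (a :: b :: t).length / 2
      hashDC p ((a :: b :: t).take half) + p ^ half * hashDC p ((a :: b :: t).drop half)
termination_by s.length
decreasing_by
  · simp [List.length_take]; omega
  · simp [List.length_drop]; omega

def simHash_alt (doc : List String) (p : Int) (m : Int) : List (String × String) :=
  (doc.foldl (fun (d : PySem.Dict String String) w =>
      if d.contains w then d
      else d.insert w (decToBin (PySem.Int.mod (hashDC p w.toList) m)))
    PySem.Dict.empty).items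

-- ===== PRECONDITION & SPEC =====
-- Pre_ excludes only m = 0 with a nonempty doc, exactly where Python's score % m raises ZeroDivisionError.
def Pre_simHash (doc : List String) (p : Int) (m : Int) : Prop := doc = [] ∨ m ≠ 0
instance (doc : List String) (p : Int) (m : Int) : Decidable (Pre_simHash doc p m) := by unfold Pre_simHash; infer_instance
def pvWitness_simHash : List String × Int × Int := (["ab", ""], 53, 7)

def Spec_simHash (doc : List String) (p : Int) (m : Int) (out : List (String × String)) : Prop := out = simHash_alt doc p m
instance (doc : List String) (p : Int) (m : Int) (out : List (String × String)) : Decidable (Spec_simHash doc p m out) := by unfold Spec_simHash; infer_instance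

-- ===== CLAIM (what is proved, stated in full; the proofs are below) =====
def Claim_equal_simHash : Prop := ∀ (doc : List String) (p : Int) (m : Int), Dom_simHash doc p m → Pre_simHash doc p m → Spec_simHash doc p m (simHash doc p m)

-- ===== LEMMAS AND PROOFS =====

-- A's inner loop from state (s, c) computes s + p^c * Horner value of the string.
theorem simHash_horner (p : Int) (l : List Char) :
    ∀ (s : Int) (c : Nat),
      (l.foldl (fun (st : Int × Nat) j => (st.1 + (j.toNat : Int) * p ^ st.2, st.2 + 1)) (s, c)).1
        = s + p ^ c * l.foldr (fun j (sc : Int) => sc * p + (j.toNat : Int)) 0 := by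
  induction l with
  | nil => intro s c; simp
  | cons j t ih =>
      intro s c
      simp only [List.foldl_cons, List.foldr_cons, ih]
      ring

-- the Horner polynomial with an arbitrary seed b: seed contributes p^len * b
theorem horner_seed (p : Int) (l : List Char) :
    ∀ b : Int, l.foldr (fun j (sc : Int) => sc * p + (j.toNat : Int)) b
      = l.foldr (fun j (sc : Int) => sc * p + (j.toNat : Int)) 0 + p ^ l.length * b := by
  induction l with
  | nil => intro b; simp
  | cons j t ih =>
      intro b
      rw [List.foldr_cons, List.foldr_cons, ih b, List.length_cons]
      ring

-- B's divide-and-conquer hash computes the same polynomial value as A's loop.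
theorem hashDC_eq_aux (p : Int) :
    ∀ (n : Nat) (s : List Char), s.length ≤ n →
      hashDC p s = s.foldr (fun j (sc : Int) => sc * p + (j.toNat : Int)) 0 := by
  intro n
  induction n with
  | zero =>
      intro s hs
      match s, hs with
      | [], _ => rw [hashDC]; simp
  | succ n ih =>
      intro s hs
      match s with
      | [] => rw [hashDC]; simp
      | [c] => rw [hashDC]; simp
      | a :: b :: t =>
          rw [hashDC]
          have hhalf : (a :: b :: t).length / 2 ≤ t.length + 1 := by
            simp; omega
          have hlen : ((a :: b :: t).take ((a :: b :: t).length / 2)).length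
              = (a :: b :: t).length / 2 := by
            simp [List.length_take]; omega
          rw [ih _ (by rw [hlen]; simp at hs ⊢; omega),
              ih _ (by simp [List.length_drop] at hs ⊢; omega)]
          conv_rhs => rw [← List.take_append_drop ((a :: b :: t).length / 2) (a :: b :: t),
            List.foldr_append, horner_seed]
          rw [hlen]

theorem hashDC_eq (p : Int) (s : List Char) :
    hashDC p s = s.foldr (fun j (sc : Int) => sc * p + (j.toNat : Int)) 0 :=
  hashDC_eq_aux p s.length s le_rfl

-- inserting a key already present with the value the invariant dictates is a no-op,
-- so A's overwriting fold equals B's skipping fold.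
theorem fold_insert_eq_fold_skip (f : String → String) :
    ∀ (doc : List String) (d : PySem.Dict String String),
      (∀ q ∈ d.items, q.2 = f q.1) →
      doc.foldl (fun d w => d.insert w (f w)) d
        = doc.foldl (fun d w => if d.contains w then d else d.insert w (f w)) d := by
  intro doc
  induction doc with
  | nil => intro d _; rfl
  | cons w t ih =>
      intro d hinv
      simp only [List.foldl_cons]
      by_cases hc : d.contains w = true
      · rw [if_pos hc]
        have hins : d.insert w (f w) = d := by
          apply PySem.Dict.ext
          rw [PySem.Dict.items_insert, if_pos hc]
          conv_rhs => rw [← List.map_id d.items]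
          apply List.map_congr_left
          intro q hq
          by_cases hqw : (q.1 == w) = true
          · rw [if_pos hqw]
            have h1 : q.1 = w := eq_of_beq hqw
            have h2 : q.2 = f q.1 := hinv q hq
            cases q; simp_all
          · rw [if_neg hqw]; rfl
        rw [hins]
        exact ih d hinv
      · rw [if_neg (by simp [hc])]
        apply ih
        intro q hq
        rcases (PySem.Dict.mem_items_insert _ _ _ _).1 hq with h | h
        · rw [h]
        · exact hinv q h.1

-- per-key values of A and B agree
theorem value_eq (p m : Int) (w : String) :
    decToBin (PySem.Int.mod
      (w.toList.foldl (fun (st : Int × Nat) j => (st.1 + (j.toNat : Int) * p ^ st.2, st.2 + 1)) ((0 : Int), (0 : Nat))).1 m)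
    = decToBin (PySem.Int.mod (hashDC p w.toList) m) := by
  rw [simHash_horner, hashDC_eq]
  norm_num

-- ===== VERDICT (by name: the statement is the Claim_ definition above) =====
theorem simHash_spec : Claim_equal_simHash := by
  intro doc p m _ _
  unfold Spec_simHash simHash simHash_alt
  apply congrArg PySem.Dict.items
  have hstep : (fun (d : PySem.Dict String String) i =>
      let st := i.toList.foldl
        (fun (st : Int × Nat) j => (st.1 + (j.toNat : Int) * p ^ st.2, st.2 + 1)) ((0 : Int), (0 : Nat))
      d.insert i (decToBin (PySem.Int.mod st.1 m)))
      = (fun (d : PySem.Dict String String) w =>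
          d.insert w (decToBin (PySem.Int.mod (hashDC p w.toList) m))) := by
    funext d w
    simp only []
    rw [value_eq]
  rw [hstep]
  exact fold_insert_eq_fold_skip _ doc PySem.Dict.empty (by intro q hq; simp [PySem.Dict.empty] at hq)
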